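-- pv_equiv track=rewrite | github.com/Justtus/SwitchConfigPlaybookMaker | cisco_to_ansible.py | parse_blocks
-- ===== SOURCE A (Python) =====
-- from typing import Iterable
--
-- def parse_blocks(lines: Iterable[str]) -> list[tuple[str, int, list[tuple[str, int]]]]:
--     """Split config into (header, header_lineno, [(child, child_lineno)]) blocks.
--
--     A block is introduced by a line starting in column 0 and continues while
--     following lines are indented. Blank lines and bang-comment lines ('!') end
--     the current block. Children are stripped of leading whitespace but keep
--     internal spacing. Line numbers are 1-indexed source positions.
--     """
--     blocks: list[tuple[str, int, list[tuple[str, int]]]] = []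
--     current: tuple[str, int, list[tuple[str, int]]] | None = None
--     for idx, raw in enumerate(lines, start=1):
--         line = raw.rstrip('\r\n')
--         stripped = line.rstrip()
--         if stripped == '' or stripped == '!':
--             if current is not None:
--                 blocks.append(current)
--                 current = None
--             continue
--         if line.startswith((' ', '\t')):
--             if current is None:
--                 continue
--             current[2].append((line.strip(), idx))
--         else:
--             if current is not None:
--                 blocks.append(current)
--             current = (stripped, idx, [])
--     if current is not None:
--         blocks.append(current)
--     return blocks
-- ===== SOURCE B (Python) =====
-- def _is_header(raw):
--     line = raw.rstrip('\r\n')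
--     s = line.rstrip()
--     return s != '' and s != '!' and not line.startswith((' ', '\t'))
--
-- def _is_child(raw):
--     line = raw.rstrip('\r\n')
--     s = line.rstrip()
--     return line.startswith((' ', '\t')) and s != '' and s != '!'
--
-- def parse_blocks(lines):
--     lines = list(lines)
--     header_positions = [k for k, raw in enumerate(lines) if _is_header(raw)]
--     blocks = []
--     for k in header_positions:
--         children = []
--         j = k + 1
--         while j < len(lines) and _is_child(lines[j]):
--             children.append((lines[j].rstrip('\r\n').strip(), j + 1))
--             j += 1
--         blocks.append((lines[k].rstrip('\r\n').rstrip(), k + 1, children))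
--     return blocks
-- ===== Notes on version B (the rewrite author's own statement) =====
-- stated objective: alternative
-- what changed: Replaced the single-pass mutable 'current' state machine with an anchor pass that records header positions and then, per header, gathers its indented children from the following slice.
import Mathlib
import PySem

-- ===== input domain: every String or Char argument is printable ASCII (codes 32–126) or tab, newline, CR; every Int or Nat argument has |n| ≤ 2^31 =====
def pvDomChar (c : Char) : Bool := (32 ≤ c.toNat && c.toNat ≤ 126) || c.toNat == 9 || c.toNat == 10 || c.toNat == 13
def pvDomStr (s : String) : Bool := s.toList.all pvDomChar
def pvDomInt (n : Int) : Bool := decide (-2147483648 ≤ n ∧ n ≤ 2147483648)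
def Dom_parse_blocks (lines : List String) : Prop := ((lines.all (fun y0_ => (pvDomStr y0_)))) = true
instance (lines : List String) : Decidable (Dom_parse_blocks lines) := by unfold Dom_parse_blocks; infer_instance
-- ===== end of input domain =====

-- B replaces A's mutable 'current' state machine with a header-anchor pass plus per-anchor
-- child gathering (objective: alternative decomposition, same asymptotic cost).

-- shared character-level helpers (both Pythons perform these identical per-line tests)
-- raw.rstrip('\r\n'): exact — drops only trailing '\r'/'\n' characters
def pbLine (raw : String) : String :=
  String.ofList ((raw.toList.reverse.dropWhile (fun c => c == '\r' || c == '\n')).reverse)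
def pbStripped (raw : String) : String := PySem.Str.rstrip (pbLine raw)
-- line.startswith((' ', '\t'))
def pbIndented (raw : String) : Bool :=
  PySem.Str.startswith (pbLine raw) " " || PySem.Str.startswith (pbLine raw) "\t"
-- stripped == '' or stripped == '!'
def pbTerm (raw : String) : Bool := pbStripped raw == "" || pbStripped raw == "!"

-- ===== PORT A =====
def pbA_step (st : List (String × Int × (List (String × Int))) × Option (String × Int × (List (String × Int))))
    (p : Int × String) :
    List (String × Int × (List (String × Int))) × Option (String × Int × (List (String × Int))) :=
  if pbTerm p.2 then
    match st.2 with
    | some c => (st.1 ++ [c], none)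
    | none => (st.1, none)
  else if pbIndented p.2 then
    match st.2 with
    | none => (st.1, none)
    | some (h, n, cs) => (st.1, some (h, n, cs ++ [(PySem.Str.strip (pbLine p.2), p.1)]))
  else
    match st.2 with
    | some c => (st.1 ++ [c], some (pbStripped p.2, p.1, []))
    | none => (st.1, some (pbStripped p.2, p.1, []))

def parse_blocks (lines : List String) : List (String × Int × (List (String × Int))) :=
  let st := (PySem.List.enumerate lines 1).foldl pbA_step ([], none)
  match st.2 with
  | some c => st.1 ++ [c]
  | none => st.1

-- ===== PORT B =====
def pbIsHeader (raw : String) : Bool := !pbTerm raw && !pbIndented raw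
def pbIsChild (raw : String) : Bool := pbIndented raw && !pbTerm raw

-- the 'while j < len(lines) and _is_child(lines[j])' gathering loop
-- (the 0 ≤ j conjunct only makes the recursion total; the loop is entered with j ≥ 1)
def pbGatherFrom (lines : List String) (j : Int) : List (String × Int) :=
  if h : 0 ≤ j ∧ j < lines.length then
    let sub := lines[j.toNat]'(by omega)
    if pbIsChild sub then (PySem.Str.strip (pbLine sub), j + 1) :: pbGatherFrom lines (j + 1)
    else []
  else []
termination_by lines.length - j.toNat
decreasing_by omega

def parse_blocks_alt (lines : List String) : List (String × Int × (List (String × Int))) :=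
  let headerPositions :=
    ((PySem.List.enumerate lines 0).filter (fun q => pbIsHeader q.2)).map (fun q => q.1)
  headerPositions.map (fun k =>
    let children := pbGatherFrom lines (k + 1)
    match PySem.List.pyGet? lines k with
    | some raw => (pbStripped raw, k + 1, children)
    | none => ("", 0, children))  -- unreachable: k is an in-range enumerate index

-- ===== PRECONDITION & SPEC =====
def Spec_parse_blocks (lines : List String) (out : List (String × Int × (List (String × Int)))) : Prop := out = parse_blocks_alt lines
instance (lines : List String) (out : List (String × Int × (List (String × Int)))) : Decidable (Spec_parse_blocks lines out) := by unfold Spec_parse_blocks; infer_instance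

-- ===== CLAIM (what is proved, stated in full; the proofs are below) =====
def Claim_equal_parse_blocks : Prop := ∀ (lines : List String), Dom_parse_blocks lines → Spec_parse_blocks lines (parse_blocks lines)

-- ===== LEMMAS AND PROOFS =====

-- proof-side paired form of the gathering loop (children with their line numbers)
def pbGather : List (Int × String) → List (String × Int)
  | [] => []
  | (m, sub) :: rest =>
    if pbIsChild sub then (PySem.Str.strip (pbLine sub), m) :: pbGather rest else []

-- canonical recursive form of B: headers anchor, children gathered from the tail
def pbGo : List (Int × String) → List (String × Int × (List (String × Int)))
  | [] => []
  | (n, raw) :: rest =>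
    if pbIsHeader raw then (pbStripped raw, n, pbGather rest) :: pbGo rest else pbGo rest

def pbFinish (st : List (String × Int × (List (String × Int))) × Option (String × Int × (List (String × Int)))) :
    List (String × Int × (List (String × Int))) :=
  match st.2 with
  | some c => st.1 ++ [c]
  | none => st.1

theorem pb_main (l : List (Int × String)) :
    (∀ acc, pbFinish (l.foldl pbA_step (acc, none)) = acc ++ pbGo l) ∧
    (∀ acc h n cs, pbFinish (l.foldl pbA_step (acc, some (h, n, cs))) =
      acc ++ (h, n, cs ++ pbGather l) :: pbGo l) := by
  induction l with
  | nil => exact ⟨fun acc => by simp [pbFinish, pbGo], fun acc h n cs => by simp [pbFinish, pbGather, pbGo]⟩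
  | cons p t ih =>
    obtain ⟨m, r⟩ := p
    by_cases hterm : pbTerm r
    · refine ⟨fun acc => ?_, fun acc h n cs => ?_⟩
      · simp [pbA_step, hterm, pbGo, pbIsHeader, ih.1]
      · simp [pbA_step, hterm, pbGo, pbGather, pbIsHeader, pbIsChild, ih.1]
    · by_cases hind : pbIndented r
      · refine ⟨fun acc => ?_, fun acc h n cs => ?_⟩
        · simp [pbA_step, hterm, hind, pbGo, pbIsHeader, ih.1]
        · simp [pbA_step, hterm, hind, pbGo, pbGather, pbIsHeader, pbIsChild, ih.2]
      · refine ⟨fun acc => ?_, fun acc h n cs => ?_⟩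
        · simp [pbA_step, hterm, hind, pbGo, pbIsHeader, ih.2]
        · simp [pbA_step, hterm, hind, pbGo, pbGather, pbIsHeader, pbIsChild, ih.2]

-- proof-side fused form of B's per-header body
def pbBody (lines : List String) (k : Int) : String × Int × (List (String × Int)) :=
  match PySem.List.pyGet? lines k with
  | some raw => (pbStripped raw, k + 1, pbGatherFrom lines (k + 1))
  | none => ("", 0, pbGatherFrom lines (k + 1))

theorem pb_gatherFrom_eq (full : List String) : ∀ (t : List String) (s : Nat), full.drop s = t →
    pbGatherFrom full (↑s) = pbGather (PySem.List.enumerate t (↑s + 1)) := by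
  intro t
  induction t with
  | nil =>
    intro s h
    rw [pbGatherFrom]
    have hs : full.length ≤ s := by
      by_contra hlt
      push_neg at hlt
      rw [List.drop_eq_getElem_cons hlt] at h
      exact List.cons_ne_nil _ _ h
    rw [dif_neg (by omega)]
    simp [PySem.List.enumerate_nil, pbGather]
  | cons sub rest ih =>
    intro s h
    have hs : s < full.length := by
      by_contra hge
      push_neg at hge
      rw [List.drop_eq_nil_iff.mpr (by omega)] at h
      exact List.cons_ne_nil _ _ h.symm
    rw [List.drop_eq_getElem_cons hs] at h
    obtain ⟨hsub, hrest⟩ := List.cons.injEq .. ▸ h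
    rw [pbGatherFrom, dif_pos (by constructor <;> omega)]
    rw [PySem.List.enumerate_cons, pbGather]
    have htn : ((s : Int)).toNat = s := Int.toNat_natCast s
    have hix : full[((s : Int)).toNat]'(by omega) = sub := by simp [htn, hsub]
    rw [hix]
    by_cases hc : pbIsChild sub
    · rw [if_pos hc, if_pos hc]
      have := ih (s + 1) hrest
      rw [show ((s : Int) + 1) = ((s + 1 : Nat) : Int) by push_cast; ring, this]
    · rw [if_neg hc, if_neg hc]

set_option maxHeartbeats 1000000 in
theorem pb_alt_eq_go (full : List String) : ∀ (t : List String) (s : Nat), full.drop s = t →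
    ((PySem.List.enumerate t (↑s)).filter (fun q => pbIsHeader q.2)).map (fun q => pbBody full q.1)
      = pbGo (PySem.List.enumerate t (↑s + 1)) := by
  intro t
  induction t with
  | nil => intro s h; simp [PySem.List.enumerate_nil, pbGo]
  | cons sub rest ih =>
    intro s h
    have hs : s < full.length := by
      by_contra hge
      push_neg at hge
      rw [List.drop_eq_nil_iff.mpr (by omega)] at h
      exact List.cons_ne_nil _ _ h.symm
    rw [List.drop_eq_getElem_cons hs] at h
    obtain ⟨hsub, hrest⟩ := List.cons.injEq .. ▸ h
    rw [PySem.List.enumerate_cons, List.filter_cons, PySem.List.enumerate_cons]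
    have hcast : ((s : Int) + 1) = ((s + 1 : Nat) : Int) := by push_cast; ring
    have hih := ih (s + 1) hrest
    have hgather := pb_gatherFrom_eq full rest (s + 1) hrest
    have hhead : pbBody full ((s : Nat) : Int)
        = ((pbStripped sub, ((s : Int) + 1),
            pbGather (PySem.List.enumerate rest ((s : Int) + 1 + 1))) :
              String × Int × List (String × Int)) := by
      unfold pbBody
      rw [PySem.List.pyGet?_natCast, List.getElem?_eq_getElem hs, hsub, hcast, hgather]
    by_cases hx : pbIsHeader sub
    · rw [if_pos (by simpa using hx)]
      simp only [List.map_cons]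
      rw [hhead, hcast, hih, pbGo, if_pos hx]
    · rw [if_neg (by simpa using hx), pbGo, if_neg hx, hcast, hih]

theorem pb_alt_unfold (lines : List String) :
    parse_blocks_alt lines =
      ((PySem.List.enumerate lines 0).filter (fun q => pbIsHeader q.2)).map
        (fun q => pbBody lines q.1) := by
  unfold parse_blocks_alt
  rw [List.map_map]
  apply List.map_congr_left
  intro q _
  simp only [Function.comp_def]
  unfold pbBody
  cases h : PySem.List.pyGet? lines q.1 with
  | none => rfl
  | some p => rfl

-- ===== VERDICT (by name: the statement is the Claim_ definition above) =====
theorem parse_blocks_spec : Claim_equal_parse_blocks := by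
  intro lines _
  unfold Spec_parse_blocks parse_blocks
  rw [pb_alt_unfold]
  have h := pb_alt_eq_go lines lines 0 (by simp)
  norm_num at h
  rw [h]
  exact (pb_main (PySem.List.enumerate lines 1)).1 []
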